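-- pv_equiv track=rewrite | github.com/PhilJ0ly/albatros_axion_detection | test.py | get_chunkier
-- ===== SOURCE A (Python) =====
-- def get_chunkier(nchunks, lchunk, nblock, lblock, ntap):
--     ranges = []
--     stride_sz = nblock * lblock
--     overlap_sz = (ntap - 1) * lblock
--     total_needed = stride_sz + overlap_sz
--
--     remainder = 0
--     cur_chunk = 0
--     sample_offset = 0  # total number of samples processed so far
--
--     while True:
--         start_chunk = cur_chunk
--         added = 0
--
--         # Accumulate until we have enough samples
--         while remainder < total_needed and cur_chunk < nchunks:
--             remainder += lchunk
--             cur_chunk += 1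
--             added += 1
--
--         if remainder >= total_needed:
--             ranges.append((start_chunk, cur_chunk))
--             remainder -= stride_sz  # we retain the overlap
--             sample_offset += stride_sz
--         else:
--             if remainder > 0:
--                 ranges.append((start_chunk, None))
--             break
--
--     return ranges
-- ===== SOURCE B (Python) =====
-- def get_chunkier(nchunks, lchunk, nblock, lblock, ntap):
--     stride_sz = nblock * lblock
--     total_needed = stride_sz + (ntap - 1) * lblock
--     ranges = []
--     cur = 0
--     remainder = 0
--     while True:
--         deficit = total_needed - remainder
--         if deficit <= 0:
--             take = 0
--         elif lchunk > 0:
--             take = -(-deficit // lchunk)  # ceil(deficit / lchunk): chunks needed to cover the deficit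
--         else:
--             take = nchunks - cur + 1  # non-positive chunk length: target unreachable with remaining chunks
--         if cur + take > nchunks:
--             break
--         ranges.append((cur, cur + take))
--         remainder += take * lchunk - stride_sz
--         cur += take
--     leftover = remainder + max(nchunks - cur, 0) * lchunk
--     if leftover > 0:
--         ranges.append((cur, None))
--     return ranges
-- ===== Notes on version B (the rewrite author's own statement) =====
-- stated objective: faster
-- what changed: Each stride range is computed in O(1) by ceiling division of the sample deficit by the chunk length, instead of accumulating chunk by chunk; the trailing partial range is decided by one closed-form leftover computation.
-- intended difference: When nchunks < 0 while the stride nblock*lblock is positive and at least the whole window stride+(ntap-1)*lblock is non-positive, A returns a list of phantom empty ranges (0, 0) produced by leftover loop state on a chunkless stream, while B returns [], the intended answer for no available chunks. — e.g. on get_chunkier(-1, 1, 1, 1, -1): A returns [(0, some 0), (0, some 0)], B returns []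
import Mathlib
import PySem

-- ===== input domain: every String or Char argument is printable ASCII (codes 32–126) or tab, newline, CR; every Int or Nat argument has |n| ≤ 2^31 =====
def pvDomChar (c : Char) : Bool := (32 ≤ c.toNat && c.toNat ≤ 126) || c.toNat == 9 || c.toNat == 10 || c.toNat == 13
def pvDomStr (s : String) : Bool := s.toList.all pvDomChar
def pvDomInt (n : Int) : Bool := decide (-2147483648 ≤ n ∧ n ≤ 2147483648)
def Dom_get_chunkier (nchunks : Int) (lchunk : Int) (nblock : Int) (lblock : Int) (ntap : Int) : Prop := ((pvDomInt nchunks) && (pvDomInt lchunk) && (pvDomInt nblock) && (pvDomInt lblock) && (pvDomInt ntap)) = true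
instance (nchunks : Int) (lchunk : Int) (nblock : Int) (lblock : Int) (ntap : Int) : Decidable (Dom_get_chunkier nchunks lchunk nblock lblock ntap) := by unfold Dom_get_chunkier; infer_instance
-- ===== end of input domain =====

-- B replaces A's chunk-by-chunk accumulation by one ceiling division per emitted range (measured faster, asymptotically fewer loop steps).

-- ===== PORT A =====
-- inner 'while remainder < total_needed and cur_chunk < nchunks' loop of A; the Nat argument is the
-- iteration bound (nchunks - cur_chunk).toNat making the recursion structural; the guard is A's, unchanged
def pvInnerA (nchunks lchunk need : Int) : Nat → Int → Int → Int → Int × Int × Int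
  | 0, rem, cur, added => (rem, cur, added)
  | k+1, rem, cur, added =>
    if rem < need ∧ cur < nchunks then pvInnerA nchunks lchunk need k (rem + lchunk) (cur + 1) (added + 1)
    else (rem, cur, added)

-- outer 'while True' loop of A, with fuel (an upper bound on the number of outer iterations)
def pvLoopA (nchunks lchunk stride need : Int) : Nat → Int → Int → Int → List (Int × Option Int) → List (Int × Option Int)
  | 0, _, _, _, acc => acc
  | f+1, rem, cur, off, acc =>
    let r := pvInnerA nchunks lchunk need (nchunks - cur).toNat rem cur 0
    if need ≤ r.1 then
      pvLoopA nchunks lchunk stride need f (r.1 - stride) r.2.1 (off + stride) (acc ++ [(cur, some r.2.1)])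
    else if 0 < r.1 then acc ++ [(cur, none)] else acc

-- shared fuel: an over-approximation of the number of outer iterations on terminating inputs
def pvFuel (nchunks lchunk nblock lblock ntap : Int) : Nat :=
  (nchunks.toNat + 1) * (lchunk.natAbs + 2) + (nblock * lblock).natAbs + ((ntap - 1) * lblock).natAbs + 8

def get_chunkier (nchunks : Int) (lchunk : Int) (nblock : Int) (lblock : Int) (ntap : Int) : List (Int × Option Int) :=
  pvLoopA nchunks lchunk (nblock * lblock) (nblock * lblock + (ntap - 1) * lblock)
    (pvFuel nchunks lchunk nblock lblock ntap) 0 0 0 []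

-- ===== PORT B =====
-- Source B's single-break loop; the leftover check that Source B performs after the loop is inlined at the break
def pvLoopB (nchunks lchunk stride need : Int) : Nat → Int → Int → List (Int × Option Int) → List (Int × Option Int)
  | 0, _, _, acc => acc
  | f+1, rem, cur, acc =>
    let deficit := need - rem
    let take : Int :=
      if deficit ≤ 0 then 0
      else if 0 < lchunk then -(PySem.Int.floordiv (-deficit) lchunk)
      else nchunks - cur + 1
    if nchunks < cur + take then
      if 0 < rem + max (nchunks - cur) 0 * lchunk then acc ++ [(cur, none)] else acc
    else
      pvLoopB nchunks lchunk stride need f (rem + take * lchunk - stride) (cur + take) (acc ++ [(cur, some (cur + take))])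

def get_chunkier_alt (nchunks : Int) (lchunk : Int) (nblock : Int) (lblock : Int) (ntap : Int) : List (Int × Option Int) :=
  pvLoopB nchunks lchunk (nblock * lblock) (nblock * lblock + (ntap - 1) * lblock)
    (pvFuel nchunks lchunk nblock lblock ntap) 0 0 []

-- ===== PRECONDITION & SPEC =====
-- Pre_ is exactly the set of inputs on which Python A terminates: either the stride is positive, or the
-- accumulated samples can never reach the window size (otherwise A's outer loop runs forever).
def Pre_get_chunkier (nchunks : Int) (lchunk : Int) (nblock : Int) (lblock : Int) (ntap : Int) : Prop :=
  1 ≤ nblock * lblock ∨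
    (1 ≤ nblock * lblock + (ntap - 1) * lblock ∧
      (lchunk ≤ 0 ∨ nchunks ≤ 0 ∨ nchunks * lchunk < nblock * lblock + (ntap - 1) * lblock))
instance (nchunks : Int) (lchunk : Int) (nblock : Int) (lblock : Int) (ntap : Int) : Decidable (Pre_get_chunkier nchunks lchunk nblock lblock ntap) := by unfold Pre_get_chunkier; infer_instance

def pvWitness_get_chunkier : Int × Int × Int × Int × Int := (4, 3, 2, 2, 2)

-- When nchunks < 0 while the stride nblock*lblock is positive and the whole window stride+(ntap-1)*lblock is
-- non-positive, A returns phantom empty ranges (0, 0) produced by leftover loop state on a chunkless stream,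
-- while B returns [], the intended answer for no available chunks.
def D_get_chunkier (nchunks : Int) (lchunk : Int) (nblock : Int) (lblock : Int) (ntap : Int) : Prop :=
  nchunks < 0 ∧ 1 ≤ nblock * lblock ∧ nblock * lblock + (ntap - 1) * lblock ≤ 0
instance (nchunks : Int) (lchunk : Int) (nblock : Int) (lblock : Int) (ntap : Int) : Decidable (D_get_chunkier nchunks lchunk nblock lblock ntap) := by unfold D_get_chunkier; infer_instance

def Spec_get_chunkier (nchunks : Int) (lchunk : Int) (nblock : Int) (lblock : Int) (ntap : Int) (out : List (Int × Option Int)) : Prop := ¬ D_get_chunkier nchunks lchunk nblock lblock ntap → out = get_chunkier_alt nchunks lchunk nblock lblock ntap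
instance (nchunks : Int) (lchunk : Int) (nblock : Int) (lblock : Int) (ntap : Int) (out : List (Int × Option Int)) : Decidable (Spec_get_chunkier nchunks lchunk nblock lblock ntap out) := by unfold Spec_get_chunkier; infer_instance

def pvDiffWitness_get_chunkier : Int × Int × Int × Int × Int := (-1, 1, 1, 1, -1)
def pvDiffWitnessOut_get_chunkier : (List (Int × Option Int)) × (List (Int × Option Int)) :=
  ([(0, some 0), (0, some 0)], [])

-- ===== CLAIM (what is proved, stated in full; the proofs are below) =====
def Claim_unchanged_get_chunkier : Prop := ∀ (nchunks : Int) (lchunk : Int) (nblock : Int) (lblock : Int) (ntap : Int), Dom_get_chunkier nchunks lchunk nblock lblock ntap → Pre_get_chunkier nchunks lchunk nblock lblock ntap → Spec_get_chunkier nchunks lchunk nblock lblock ntap (get_chunkier nchunks lchunk nblock lblock ntap)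
def Claim_changed_get_chunkier : Prop := Dom_get_chunkier (pvDiffWitness_get_chunkier.1) (pvDiffWitness_get_chunkier.2.1) (pvDiffWitness_get_chunkier.2.2.1) (pvDiffWitness_get_chunkier.2.2.2.1) (pvDiffWitness_get_chunkier.2.2.2.2) ∧ Pre_get_chunkier (pvDiffWitness_get_chunkier.1) (pvDiffWitness_get_chunkier.2.1) (pvDiffWitness_get_chunkier.2.2.1) (pvDiffWitness_get_chunkier.2.2.2.1) (pvDiffWitness_get_chunkier.2.2.2.2) ∧ D_get_chunkier (pvDiffWitness_get_chunkier.1) (pvDiffWitness_get_chunkier.2.1) (pvDiffWitness_get_chunkier.2.2.1) (pvDiffWitness_get_chunkier.2.2.2.1) (pvDiffWitness_get_chunkier.2.2.2.2) ∧ get_chunkier (pvDiffWitness_get_chunkier.1) (pvDiffWitness_get_chunkier.2.1) (pvDiffWitness_get_chunkier.2.2.1) (pvDiffWitness_get_chunkier.2.2.2.1) (pvDiffWitness_get_chunkier.2.2.2.2) = pvDiffWitnessOut_get_chunkier.1 ∧ get_chunkier_alt (pvDiffWitness_get_chunkier.1) (pvDiffWitness_get_chunkier.2.1) (pvDiffWitness_get_chunkier.2.2.1)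 (pvDiffWitness_get_chunkier.2.2.2.1) (pvDiffWitness_get_chunkier.2.2.2.2) = pvDiffWitnessOut_get_chunkier.2 ∧ pvDiffWitnessOut_get_chunkier.1 ≠ pvDiffWitnessOut_get_chunkier.2
def Claim_exact_get_chunkier : Prop := ∀ (nchunks : Int) (lchunk : Int) (nblock : Int) (lblock : Int) (ntap : Int), Dom_get_chunkier nchunks lchunk nblock lblock ntap → Pre_get_chunkier nchunks lchunk nblock lblock ntap → D_get_chunkier nchunks lchunk nblock lblock ntap → get_chunkier nchunks lchunk nblock lblock ntap ≠ get_chunkier_alt nchunks lchunk nblock lblock ntap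

-- ===== LEMMAS AND PROOFS =====

theorem pvInnerA_stop (nchunks lchunk need : Int) (k : Nat) (rem cur a : Int)
    (h : ¬ (rem < need ∧ cur < nchunks)) :
    pvInnerA nchunks lchunk need k rem cur a = (rem, cur, a) := by
  cases k with
  | zero => rfl
  | succ k => simp only [pvInnerA]; rw [if_neg h]

theorem pvInnerA_below (nchunks lchunk need : Int) : ∀ (n : Nat) (rem cur a : Int),
    (nchunks - cur).toNat = n → cur ≤ nchunks →
    (∀ j : Int, 0 ≤ j → j < nchunks - cur → rem + j * lchunk < need) →
    pvInnerA nchunks lchunk need n rem cur a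
      = (rem + (nchunks - cur) * lchunk, nchunks, a + (nchunks - cur)) := by
  intro n
  induction n with
  | zero =>
    intro rem cur a hn hcur _
    have hc : cur = nchunks := by omega
    subst hc
    simp [pvInnerA]
  | succ n ih =>
    intro rem cur a hn hcur hall
    have hlt : cur < nchunks := by omega
    have hrem : rem < need := by
      have := hall 0 le_rfl (by omega); simpa using this
    simp only [pvInnerA]
    rw [if_pos ⟨hrem, hlt⟩]
    rw [ih (rem + lchunk) (cur + 1) (a + 1) (by omega) (by omega)
      (fun j hj0 hj => by
        have := hall (j + 1) (by omega) (by omega)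
        have e : rem + (j + 1) * lchunk = rem + lchunk + j * lchunk := by ring
        linarith [this, e.symm.le, e.le])]
    have e1 : rem + lchunk + (nchunks - (cur + 1)) * lchunk = rem + (nchunks - cur) * lchunk := by ring
    have e2 : a + 1 + (nchunks - (cur + 1)) = a + (nchunks - cur) := by ring
    rw [e1, e2]

theorem pvInnerA_reach (nchunks lchunk need : Int) : ∀ (m : Nat) (t rem cur a : Int),
    t.toNat = m → 0 ≤ t → cur + t ≤ nchunks →
    (∀ j : Int, 0 ≤ j → j < t → rem + j * lchunk < need) →
    need ≤ rem + t * lchunk →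
    pvInnerA nchunks lchunk need (nchunks - cur).toNat rem cur a
      = (rem + t * lchunk, cur + t, a + t) := by
  intro m
  induction m with
  | zero =>
    intro t rem cur a hm ht0 _ _ hhi
    have ht : t = 0 := by omega
    subst ht
    have : need ≤ rem := by linarith [hhi]
    rw [pvInnerA_stop _ _ _ _ _ _ _ (by intro h; exact absurd h.1 (not_lt.mpr this))]
    simp
  | succ m ih =>
    intro t rem cur a hm ht0 hfit hlow hhi
    have ht1 : 1 ≤ t := by omega
    have hltn : cur < nchunks := by omega
    have hrem : rem < need := by have := hlow 0 le_rfl (by omega); simpa using this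
    obtain ⟨k, hk⟩ : ∃ k, (nchunks - cur).toNat = k + 1 := ⟨(nchunks - cur).toNat - 1, by omega⟩
    rw [hk]
    simp only [pvInnerA]
    rw [if_pos ⟨hrem, hltn⟩]
    have hk2 : k = (nchunks - (cur + 1)).toNat := by omega
    rw [hk2]
    rw [ih (t - 1) (rem + lchunk) (cur + 1) (a + 1) (by omega) (by omega) (by omega)
      (fun j hj0 hj => by
        have := hlow (j + 1) (by omega) (by omega)
        have e : rem + (j + 1) * lchunk = rem + lchunk + j * lchunk := by ring
        linarith [this, e.le, e.symm.le])
      (by have e : rem + lchunk + (t - 1) * lchunk = rem + t * lchunk := by ring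
          linarith [hhi, e.le, e.symm.le])]
    have e1 : rem + lchunk + (t - 1) * lchunk = rem + t * lchunk := by ring
    have e2 : cur + 1 + (t - 1) = cur + t := by ring
    have e3 : a + 1 + (t - 1) = a + t := by ring
    rw [e1, e2, e3]

-- ceiling division -(-d // L) for positive L bounds the deficit d from both sides
theorem pvCeil_bounds (lchunk d : Int) (hlc : 0 < lchunk) (hd : 0 < d) :
    1 ≤ -(PySem.Int.floordiv (-d) lchunk) ∧
    (-(PySem.Int.floordiv (-d) lchunk) - 1) * lchunk < d ∧
    d ≤ -(PySem.Int.floordiv (-d) lchunk) * lchunk := by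
  rw [PySem.Int.floordiv_eq_ediv_of_pos hlc]
  have h1 : lchunk * ((-d) / lchunk) + (-d) % lchunk = -d := Int.ediv_add_emod (-d) lchunk
  have h2 : 0 ≤ (-d) % lchunk := Int.emod_nonneg _ (by omega)
  have h3 : (-d) % lchunk < lchunk := Int.emod_lt_of_pos _ hlc
  set q := (-d) / lchunk with hq
  have e1 : (-q) * lchunk = -(lchunk * q) := by ring
  have e2 : ((-q) - 1) * lchunk = -(lchunk * q) - lchunk := by ring
  have hqneg : q < 0 := by
    by_contra hcon
    push_neg at hcon
    have : 0 ≤ lchunk * q := mul_nonneg hlc.le hcon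
    linarith
  refine ⟨by omega, by linarith [e2.le, e2.symm.le], by linarith [e1.le, e1.symm.le]⟩

-- one-step simulation: A's outer loop equals B's loop, same fuel, on states satisfying the invariant
theorem pvLoop_eq (nchunks lchunk stride need : Int) : ∀ (f : Nat) (rem cur off : Int)
    (acc : List (Int × Option Int)),
    (cur ≤ nchunks ∨ (cur = 0 ∧ rem = 0 ∧ 1 ≤ need)) →
    pvLoopA nchunks lchunk stride need f rem cur off acc
      = pvLoopB nchunks lchunk stride need f rem cur acc := by
  intro f
  induction f with
  | zero => intro rem cur off acc _; rfl
  | succ f ih =>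
    intro rem cur off acc hinv
    by_cases hrem : need ≤ rem
    · -- already enough samples: both emit the empty advance (cur, cur)
      have hcur : cur ≤ nchunks := by
        rcases hinv with h | ⟨_, h2, h3⟩
        · exact h
        · omega
      have hinner := pvInnerA_stop nchunks lchunk need (nchunks - cur).toNat rem cur 0
        (by intro h; exact absurd h.1 (not_lt.mpr hrem))
      simp only [pvLoopA, pvLoopB, hinner]
      rw [if_pos hrem, if_pos (by omega : need - rem ≤ 0), if_neg (by omega : ¬ nchunks < cur + 0)]
      have e0 : rem + 0 * lchunk - stride = rem - stride := by ring
      rw [e0, add_zero]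
      exact ih (rem - stride) cur (off + stride) (acc ++ [(cur, some cur)]) (Or.inl hcur)
    · push_neg at hrem
      by_cases hlc : 0 < lchunk
      · -- positive chunk length: B's take is the exact number of chunks A's inner loop consumes
        obtain ⟨ht1, htlo, hthi⟩ := pvCeil_bounds lchunk (need - rem) hlc (by omega)
        set t := -(PySem.Int.floordiv (-(need - rem)) lchunk) with htdef
        have hlow : ∀ j : Int, 0 ≤ j → j < t → rem + j * lchunk < need := by
          intro j hj0 hjt
          have : j * lchunk ≤ (t - 1) * lchunk :=
            mul_le_mul_of_nonneg_right (by omega) hlc.le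
          linarith
        by_cases hcur : cur ≤ nchunks
        · by_cases hfit : cur + t ≤ nchunks
          · have hinner := pvInnerA_reach nchunks lchunk need t.toNat t rem cur 0 rfl
              (by omega) hfit hlow (by linarith)
            simp only [pvLoopA, pvLoopB, hinner]
            rw [if_pos (by linarith : need ≤ rem + t * lchunk),
              if_neg (by omega : ¬ need - rem ≤ 0), if_pos hlc,
              if_neg (by omega : ¬ nchunks < cur + t)]
            exact ih _ _ _ _ (Or.inl hfit)
          · -- chunks run out before the deficit is covered: both emit the tail
            push_neg at hfit
            have hinner := pvInnerA_below nchunks lchunk need (nchunks - cur).toNat rem cur 0 rfl hcur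
              (fun j hj0 hj => hlow j hj0 (by omega))
            have hrem' : rem + (nchunks - cur) * lchunk < need :=
              hlow (nchunks - cur) (by omega) (by omega)
            simp only [pvLoopA, pvLoopB, hinner]
            rw [if_neg (not_le.mpr hrem'), if_neg (by omega : ¬ need - rem ≤ 0), if_pos hlc,
              if_pos (by omega : nchunks < cur + t),
              max_eq_left (by omega : (0:Int) ≤ nchunks - cur)]
        · push_neg at hcur
          obtain ⟨hc0, hr0, hn1⟩ : cur = 0 ∧ rem = 0 ∧ 1 ≤ need := by
            rcases hinv with h | h
            · omega
            · exact h
          have hinner := pvInnerA_stop nchunks lchunk need (nchunks - cur).toNat rem cur 0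
            (by intro h; omega)
          simp only [pvLoopA, pvLoopB, hinner]
          rw [if_neg (not_le.mpr hrem), if_neg (by omega : ¬ (0:Int) < rem),
            if_neg (by omega : ¬ need - rem ≤ 0), if_pos hlc,
            if_pos (by omega : nchunks < cur + t),
            max_eq_right (by omega : nchunks - cur ≤ 0)]
          rw [if_neg (by subst hr0; simp)]
      · -- non-positive chunk length: the deficit is unreachable; both emit only the tail
        push_neg at hlc
        by_cases hcur : cur ≤ nchunks
        · have hinner := pvInnerA_below nchunks lchunk need (nchunks - cur).toNat rem cur 0 rfl hcur
            (fun j hj0 _ => by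
              have : j * lchunk ≤ 0 := mul_nonpos_of_nonneg_of_nonpos hj0 hlc
              linarith)
          have hrem' : rem + (nchunks - cur) * lchunk < need := by
            have : (nchunks - cur) * lchunk ≤ 0 :=
              mul_nonpos_of_nonneg_of_nonpos (by omega) hlc
            linarith
          simp only [pvLoopA, pvLoopB, hinner]
          rw [if_neg (not_le.mpr hrem'), if_neg (by omega : ¬ need - rem ≤ 0),
            if_neg (not_lt.mpr hlc), if_pos (by omega : nchunks < cur + (nchunks - cur + 1)),
            max_eq_left (by omega : (0:Int) ≤ nchunks - cur)]
        · push_neg at hcur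
          obtain ⟨hc0, hr0, hn1⟩ : cur = 0 ∧ rem = 0 ∧ 1 ≤ need := by
            rcases hinv with h | h
            · omega
            · exact h
          have hinner := pvInnerA_stop nchunks lchunk need (nchunks - cur).toNat rem cur 0
            (by intro h; omega)
          simp only [pvLoopA, pvLoopB, hinner]
          rw [if_neg (not_le.mpr hrem), if_neg (by omega : ¬ (0:Int) < rem),
            if_neg (by omega : ¬ need - rem ≤ 0), if_neg (not_lt.mpr hlc),
            if_pos (by omega : nchunks < cur + (nchunks - cur + 1)),
            max_eq_right (by omega : nchunks - cur ≤ 0)]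
          rw [if_neg (by subst hr0; simp)]

-- the accumulator is a prefix of pvLoopA's result (used for Claim_exact)
theorem pvLoopA_prefix (nchunks lchunk stride need : Int) : ∀ (f : Nat) (rem cur off : Int)
    (acc : List (Int × Option Int)),
    ∃ t, pvLoopA nchunks lchunk stride need f rem cur off acc = acc ++ t := by
  intro f
  induction f with
  | zero => intro rem cur off acc; exact ⟨[], by simp [pvLoopA]⟩
  | succ f ih =>
    intro rem cur off acc
    simp only [pvLoopA]
    set r := pvInnerA nchunks lchunk need (nchunks - cur).toNat rem cur 0
    by_cases h1 : need ≤ r.1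
    · rw [if_pos h1]
      obtain ⟨t, ht⟩ := ih (r.1 - stride) r.2.1 (off + stride) (acc ++ [(cur, some r.2.1)])
      exact ⟨(cur, some r.2.1) :: t, by simpa using ht⟩
    · rw [if_neg h1]
      by_cases h2 : 0 < r.1
      · rw [if_pos h2]; exact ⟨[(cur, none)], rfl⟩
      · rw [if_neg h2]; exact ⟨[], by simp⟩

-- ===== VERDICT (by name: the statement is the Claim_ definition above) =====
theorem get_chunkier_spec : Claim_unchanged_get_chunkier := by
  intro nchunks lchunk nblock lblock ntap hdom hpre
  unfold Spec_get_chunkier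
  intro hnd
  unfold get_chunkier get_chunkier_alt
  apply pvLoop_eq
  by_cases hn : 0 ≤ nchunks
  · exact Or.inl hn
  · refine Or.inr ⟨rfl, rfl, ?_⟩
    unfold Pre_get_chunkier at hpre
    unfold D_get_chunkier at hnd
    rcases hpre with h1 | h2
    · by_contra hno
      push_neg at hno
      exact hnd ⟨by omega, h1, by linarith⟩
    · exact h2.1

theorem get_chunkier_changed : Claim_changed_get_chunkier := by
  unfold Claim_changed_get_chunkier
  decide

theorem get_chunkier_tight : Claim_exact_get_chunkier := by
  intro nchunks lchunk nblock lblock ntap hdom hpre hd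
  unfold D_get_chunkier at hd
  obtain ⟨hnc, hs, hneed⟩ := hd
  obtain ⟨k, hk⟩ : ∃ k, pvFuel nchunks lchunk nblock lblock ntap = k + 1 :=
    ⟨(nchunks.toNat + 1) * (lchunk.natAbs + 2) + (nblock * lblock).natAbs
      + ((ntap - 1) * lblock).natAbs + 7, by unfold pvFuel; omega⟩
  unfold get_chunkier get_chunkier_alt
  rw [hk]
  -- B returns []
  have hB : pvLoopB nchunks lchunk (nblock * lblock) (nblock * lblock + (ntap - 1) * lblock)
      (k + 1) 0 0 [] = [] := by
    simp only [pvLoopB]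
    rw [if_pos (by omega : nblock * lblock + (ntap - 1) * lblock - 0 ≤ 0),
      if_pos (by omega : nchunks < 0 + 0),
      max_eq_right (by omega : nchunks - 0 ≤ 0)]
    rw [if_neg (by simp)]
  rw [hB]
  -- A returns a non-empty list
  have hinner := pvInnerA_stop nchunks lchunk (nblock * lblock + (ntap - 1) * lblock)
    (nchunks - 0).toNat 0 0 0 (by intro h; omega)
  simp only [pvLoopA, hinner]
  rw [if_pos (by omega : nblock * lblock + (ntap - 1) * lblock ≤ 0)]
  obtain ⟨t, ht⟩ := pvLoopA_prefix nchunks lchunk (nblock * lblock)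
    (nblock * lblock + (ntap - 1) * lblock) k (0 - nblock * lblock) 0 (0 + nblock * lblock)
    ([] ++ [(0, some 0)])
  rw [ht]
  simp
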